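-- pv_equiv track=rewrite | github.com/nicolavlicata/clicks2usa | source/simpleURL.py | hasLink
-- ===== SOURCE A (Python) =====
-- def hasLink(text):
--     link = ''
--     words = text.split()
--     for word in words:
--         if 'https://' in word:
--             link = word
--             break
--     return link
-- ===== SOURCE B (Python) =====
-- def hasLink(text):
--     i = text.find('https://')
--     if i < 0:
--         return ''
--     j = i
--     while j > 0 and not text[j-1].isspace():
--         j -= 1
--     k = i
--     while k < len(text) and not text[k].isspace():
--         k += 1
--     return text[j:k]
-- ===== Notes on version B (the rewrite author's own statement) =====
-- stated objective: alternative
-- what changed: Instead of splitting the whole text into a word list and scanning it, B locates the first occurrence of the link prefix with str.find and expands left/right to the enclosing whitespace boundaries, touching only the link's neighbourhood.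
import Mathlib
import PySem

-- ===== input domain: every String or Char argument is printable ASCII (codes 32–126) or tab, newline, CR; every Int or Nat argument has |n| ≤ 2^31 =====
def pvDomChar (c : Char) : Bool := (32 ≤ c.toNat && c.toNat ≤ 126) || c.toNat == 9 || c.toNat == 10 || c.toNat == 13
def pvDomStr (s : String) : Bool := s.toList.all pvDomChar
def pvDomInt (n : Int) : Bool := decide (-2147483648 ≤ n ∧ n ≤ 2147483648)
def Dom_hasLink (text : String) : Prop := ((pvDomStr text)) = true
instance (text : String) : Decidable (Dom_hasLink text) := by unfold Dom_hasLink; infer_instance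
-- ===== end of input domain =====

-- B replaces A's split-into-words-and-scan by str.find plus expansion to the enclosing
-- whitespace boundaries (same return value, no word list built).

-- ===== PORT A =====
-- A's for-loop with break: first word containing 'https://', else the initial link = ''.
def hasLinkLoop (words : List String) : String :=
  match words with
  | [] => ""
  | w :: ws => if PySem.Str.isIn "https://" w then w else hasLinkLoop ws

def hasLink (text : String) : String :=
  hasLinkLoop (PySem.Str.split₀ text)

-- ===== PORT B =====
-- while j > 0 and not text[j-1].isspace(): j -= 1
def scanLeft (cs : List Char) : Nat → Nat
  | 0 => 0
  | j + 1 => if PySem.Chars.isspace (cs.getD j ' ') then j + 1 else scanLeft cs j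

-- while k < len(text) and not text[k].isspace(): k += 1
def scanRight (cs : List Char) (k : Nat) : Nat :=
  if h : k < cs.length then
    (if PySem.Chars.isspace cs[k] then k else scanRight cs (k + 1))
  else k
  termination_by cs.length - k

def hasLink_alt (text : String) : String :=
  let i := PySem.Str.find text "https://"
  if i < 0 then ""
  else
    let j := scanLeft text.toList i.toNat
    let k := scanRight text.toList i.toNat
    String.ofList (PySem.Chars.slice text.toList (some (j : Int)) (some (k : Int)))

-- ===== PRECONDITION & SPEC =====
def Spec_hasLink (text : String) (out : String) : Prop := out = hasLink_alt text
instance (text : String) (out : String) : Decidable (Spec_hasLink text out) := by unfold Spec_hasLink; infer_instance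

-- ===== CLAIM (what is proved, stated in full; the proofs are below) =====
def Claim_equal_hasLink : Prop := ∀ (text : String), Dom_hasLink text → Spec_hasLink text (hasLink text)

-- ===== LEMMAS AND PROOFS =====

def pvLink : List Char := ['h', 't', 't', 'p', 's', ':', '/', '/']
def pvP (c : Char) : Bool := !(PySem.Chars.isspace c)

-- the word around position i: expand left and right to the whitespace boundaries
def pvW (cs : List Char) (i : Nat) : List Char :=
  (((cs.take i).reverse.takeWhile pvP).reverse) ++ (cs.drop i).takeWhile pvP

def pvExpand (cs : List Char) : List Char :=
  if PySem.Chars.find cs pvLink = -1 then [] else pvW cs (PySem.Chars.find cs pvLink).toNat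

-- list-level form of A's loop
def pvFirstHit (ws : List (List Char)) : List Char :=
  match ws with
  | [] => []
  | w :: ws => if PySem.Chars.isIn pvLink w then w else pvFirstHit ws

theorem pvLink_nonspace : ∀ a ∈ pvLink, PySem.Chars.isspace a = false := by
  intro a ha
  fin_cases ha <;> rfl

theorem pvTakeWhile_stop {p : Char → Bool} {c : Char} (hc : p c = false) (xs ys : List Char) :
    List.takeWhile p (xs ++ c :: ys) = List.takeWhile p xs := by
  induction xs with
  | nil => simp [hc]
  | cons a xs ih => by_cases h : p a <;> simp [h, ih]

theorem pvTakeWhile_all {p : Char → Bool} {xs : List Char} (h : ∀ a ∈ xs, p a = true) :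
    List.takeWhile p xs = xs := List.takeWhile_eq_self_iff.mpr h

theorem pvInfix_of_drop {sub u : List Char} {j : Nat} (h : sub <+: u.drop j) : sub <:+: u :=
  (PySem.Chars.isIn_iff_infix sub u).mp ((PySem.Chars.exists_prefix_drop_iff_isIn sub u).mp ⟨j, h⟩)

theorem pvDrop_of_infix {sub u : List Char} (h : sub <:+: u) : ∃ j, sub <+: u.drop j :=
  (PySem.Chars.exists_prefix_drop_iff_isIn sub u).mpr ((PySem.Chars.isIn_iff_infix sub u).mpr h)

-- uniqueness of the first occurrence pins down Chars.find of a composite string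
theorem pvFindEq (u sub : List Char) (i : Nat) (h1 : sub <+: u.drop i)
    (h2 : ∀ j, j < i → ¬ sub <+: u.drop j) : PySem.Chars.find u sub = i := by
  have hnn : 0 ≤ PySem.Chars.find u sub :=
    (PySem.Chars.find_nonneg_iff u sub).mpr (pvInfix_of_drop h1)
  obtain ⟨hp, hmin⟩ := PySem.Chars.find_spec hnn
  have : (PySem.Chars.find u sub).toNat = i := by
    rcases Nat.lt_trichotomy (PySem.Chars.find u sub).toNat i with h | h | h
    · exact absurd hp (h2 _ h)
    · exact h
    · exact absurd h1 (hmin i h)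
  omega

-- a space-free token cannot reach across a whitespace character
theorem pvSpan (sub x y : List Char) (c : Char) (hs : ∀ a ∈ sub, PySem.Chars.isspace a = false)
    (hc : PySem.Chars.isspace c = true) (h : sub <+: x ++ c :: y) : sub <+: x := by
  by_cases hl : sub.length ≤ x.length
  · exact (List.isPrefix_append_of_length hl).mp h
  · exfalso
    obtain ⟨t, ht⟩ := h
    have hx : x.length < sub.length := by omega
    have hgc : (sub ++ t)[x.length]? = some c := by
      rw [ht, List.getElem?_append_right (Nat.le_refl _)]
      simp
    rw [List.getElem?_append_left hx] at hgc
    have : c ∈ sub := List.mem_of_getElem? hgc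
    rw [hs c this] at hc
    exact Bool.false_ne_true hc

theorem pvNoHit (r rest : List Char) (c : Char)
    (hc : PySem.Chars.isspace c = true) (hno : ¬ pvLink <:+: r) {j : Nat} (hj : j ≤ r.length) :
    ¬ pvLink <+: (r ++ c :: rest).drop j := by
  intro h
  rw [List.drop_append_of_le_length hj] at h
  exact hno (pvInfix_of_drop (pvSpan pvLink (r.drop j) rest c pvLink_nonspace hc h))

theorem pvDrop_far (r rest : List Char) (c : Char) {j : Nat} (hj : r.length + 1 ≤ j) :
    (r ++ c :: rest).drop j = rest.drop (j - (r.length + 1)) := by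
  have h1 : r ++ c :: rest = (r ++ [c]) ++ rest := by simp
  have h2 : j = (r ++ [c]).length + (j - (r.length + 1)) := by simp; omega
  conv_lhs => rw [h1, h2]
  exact List.drop_length_add_append _

theorem pvExpand_spacefree (r : List Char) (hr : ∀ a ∈ r, PySem.Chars.isspace a = false) :
    pvExpand r = if PySem.Chars.isIn pvLink r then r else [] := by
  by_cases h : PySem.Chars.isIn pvLink r = true
  · have hnn : 0 ≤ PySem.Chars.find r pvLink :=
      (PySem.Chars.find_nonneg_iff r pvLink).mpr ((PySem.Chars.isIn_iff_infix pvLink r).mp h)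
    rw [pvExpand, if_neg (by omega), if_pos h, pvW]
    rw [pvTakeWhile_all (fun a ha => by
        simp [pvP, hr a (List.mem_of_mem_take (List.mem_reverse.mp ha))]),
      pvTakeWhile_all (fun a ha => by simp [pvP, hr a (List.mem_of_mem_drop ha)]),
      List.reverse_reverse, List.take_append_drop]
  · have hno : ¬ pvLink <:+: r := (PySem.Chars.isIn_eq_false_iff pvLink r).mp (eq_false_of_ne_true h)
    rw [pvExpand, if_pos ((PySem.Chars.find_eq_neg_one_iff r pvLink).mpr hno), if_neg h]

theorem pvExpand_hit (r rest : List Char) (c : Char) (hr : ∀ a ∈ r, PySem.Chars.isspace a = false)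
    (hc : PySem.Chars.isspace c = true) (h : PySem.Chars.isIn pvLink r = true) :
    pvExpand (r ++ c :: rest) = r := by
  have hnn : 0 ≤ PySem.Chars.find r pvLink :=
    (PySem.Chars.find_nonneg_iff r pvLink).mpr ((PySem.Chars.isIn_iff_infix pvLink r).mp h)
  obtain ⟨hp, hmin⟩ := PySem.Chars.find_spec hnn
  have hle := PySem.Chars.find_le_length r pvLink
  set i := (PySem.Chars.find r pvLink).toNat with hidef
  have hi : i ≤ r.length := by omega
  have hno : ∀ j, j < i → ¬ pvLink <+: r.drop j := hmin
  have hfind : PySem.Chars.find (r ++ c :: rest) pvLink = (i : Int) := by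
    apply pvFindEq
    · rw [List.drop_append_of_le_length hi]
      exact List.prefix_append_of_prefix hp
    · intro j hj hpre
      rw [List.drop_append_of_le_length (by omega)] at hpre
      exact hno j hj (pvSpan pvLink (r.drop j) rest c pvLink_nonspace hc hpre)
  have hPc : pvP c = false := by simp [pvP, hc]
  rw [pvExpand, hfind, if_neg (by omega), Int.toNat_natCast, pvW,
    List.take_append_of_le_length hi, List.drop_append_of_le_length hi,
    pvTakeWhile_stop hPc,
    pvTakeWhile_all (fun a ha => by
      simp [pvP, hr a (List.mem_of_mem_take (List.mem_reverse.mp ha))]),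
    pvTakeWhile_all (fun a ha => by simp [pvP, hr a (List.mem_of_mem_drop ha)]),
    List.reverse_reverse, List.take_append_drop]

theorem pvExpand_miss (r rest : List Char) (c : Char)
    (hc : PySem.Chars.isspace c = true) (h : PySem.Chars.isIn pvLink r = false) :
    pvExpand (r ++ c :: rest) = pvExpand rest := by
  have hno : ¬ pvLink <:+: r := (PySem.Chars.isIn_eq_false_iff pvLink r).mp h
  have hPc : pvP c = false := by simp [pvP, hc]
  by_cases hrest : PySem.Chars.find rest pvLink = -1
  · have hnr : ¬ pvLink <:+: rest := (PySem.Chars.find_eq_neg_one_iff rest pvLink).mp hrest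
    have hu : PySem.Chars.find (r ++ c :: rest) pvLink = -1 := by
      rw [PySem.Chars.find_eq_neg_one_iff]
      intro hinf
      obtain ⟨j, hj⟩ := pvDrop_of_infix hinf
      by_cases hjr : j ≤ r.length
      · exact pvNoHit r rest c hc hno hjr hj
      · rw [pvDrop_far r rest c (by omega)] at hj
        exact hnr (pvInfix_of_drop hj)
    rw [pvExpand, pvExpand, if_pos hu, if_pos hrest]
  · have hge := PySem.Chars.neg_one_le_find rest pvLink
    have hnn : 0 ≤ PySem.Chars.find rest pvLink := by omega
    obtain ⟨hp, hmin⟩ := PySem.Chars.find_spec hnn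
    have hle := PySem.Chars.find_le_length rest pvLink
    set m := (PySem.Chars.find rest pvLink).toNat with hmdef
    have hml : m ≤ rest.length := by omega
    have hfind : PySem.Chars.find (r ++ c :: rest) pvLink = ((r.length + 1 + m : Nat) : Int) := by
      apply pvFindEq
      · rw [pvDrop_far r rest c (by omega)]
        have : r.length + 1 + m - (r.length + 1) = m := by omega
        rw [this]; exact hp
      · intro j hj hpre
        by_cases hjr : j ≤ r.length
        · exact pvNoHit r rest c hc hno hjr hpre
        · rw [pvDrop_far r rest c (by omega)] at hpre
          exact hmin _ (by omega) hpre
    have hmv : PySem.Chars.find rest pvLink = (m : Int) := by omega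
    rw [pvExpand, pvExpand, hfind, hmv, if_neg (by omega), if_neg (by omega),
      Int.toNat_natCast, Int.toNat_natCast, pvW, pvW]
    have hdrop : (r ++ c :: rest).drop (r.length + 1 + m) = rest.drop m := by
      rw [pvDrop_far r rest c (by omega)]
      congr 1; omega
    have htake : (r ++ c :: rest).take (r.length + 1 + m) = (r ++ [c]) ++ rest.take m := by
      have h1 : r ++ c :: rest = (r ++ [c]) ++ rest := by simp
      have h2 : r.length + 1 + m = (r ++ [c]).length + m := by simp
      rw [h1, h2, List.take_length_add_append]
    have hrev : ((r ++ [c]) ++ rest.take m).reverse = (rest.take m).reverse ++ c :: r.reverse := by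
      simp
    rw [hdrop, htake, hrev, pvTakeWhile_stop hPc]

-- split₀.go equations and the accumulator law
theorem pvGoNil (cur : List Char) (acc : List (List Char)) :
    PySem.Chars.split₀.go [] cur acc =
      if cur.isEmpty then acc.reverse else (cur.reverse :: acc).reverse := by
  simp [PySem.Chars.split₀.go]

theorem pvGoSpace (c : Char) (rest cur : List Char) (acc : List (List Char))
    (h : PySem.Chars.isspace c = true) :
    PySem.Chars.split₀.go (c :: rest) cur acc =
      if cur.isEmpty then PySem.Chars.split₀.go rest [] acc
      else PySem.Chars.split₀.go rest [] (cur.reverse :: acc) := by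
  simp [PySem.Chars.split₀.go, h]

theorem pvGoChar (c : Char) (rest cur : List Char) (acc : List (List Char))
    (h : PySem.Chars.isspace c = false) :
    PySem.Chars.split₀.go (c :: rest) cur acc = PySem.Chars.split₀.go rest (c :: cur) acc := by
  simp [PySem.Chars.split₀.go, h]

theorem pvGoAcc (cs : List Char) : ∀ (cur : List Char) (acc : List (List Char)),
    PySem.Chars.split₀.go cs cur acc = acc.reverse ++ PySem.Chars.split₀.go cs cur [] := by
  induction cs with
  | nil =>
    intro cur acc
    rw [pvGoNil, pvGoNil]
    split_ifs <;> simp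
  | cons c rest ih =>
    intro cur acc
    by_cases hc : PySem.Chars.isspace c = true
    · rw [pvGoSpace c rest cur acc hc, pvGoSpace c rest cur [] hc]
      split_ifs with h
      · exact ih [] acc
      · rw [ih [] (cur.reverse :: acc), ih [] [cur.reverse]]
        simp
    · rw [pvGoChar c rest cur acc (eq_false_of_ne_true hc),
        pvGoChar c rest cur [] (eq_false_of_ne_true hc)]
      exact ih (c :: cur) acc

-- the main invariant: A's scan over the tokens equals B's find-and-expand
theorem pvGo (cs : List Char) : ∀ (cur : List Char),
    (∀ a ∈ cur, PySem.Chars.isspace a = false) →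
    pvFirstHit (PySem.Chars.split₀.go cs cur []) = pvExpand (cur.reverse ++ cs) := by
  induction cs with
  | nil =>
    intro cur hcur
    rw [pvGoNil, List.append_nil]
    by_cases h : cur.isEmpty
    · rw [List.isEmpty_iff.mp h]
      simp [pvFirstHit, pvExpand, if_pos (by rfl : PySem.Chars.find [] pvLink = -1)]
    · simp only [h, List.reverse_nil]
      rw [pvExpand_spacefree cur.reverse (fun a ha => hcur a (List.mem_reverse.mp ha))]
      simp [pvFirstHit]
  | cons c rest ih =>
    intro cur hcur
    by_cases hc : PySem.Chars.isspace c = true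
    · rw [pvGoSpace c rest cur [] hc]
      by_cases h : cur.isEmpty
      · rw [List.isEmpty_iff.mp h]
        simp only [List.reverse_nil, List.nil_append]
        rw [show (c :: rest) = [] ++ c :: rest from rfl,
          pvExpand_miss [] rest c hc (by rfl)]
        simpa using ih [] (by simp)
      · simp only [h]
        rw [pvGoAcc rest [] [cur.reverse]]
        have hrs : ∀ a ∈ cur.reverse, PySem.Chars.isspace a = false :=
          fun a ha => hcur a (List.mem_reverse.mp ha)
        simp only [List.reverse_cons, List.reverse_nil, List.nil_append, List.singleton_append]
        show (if PySem.Chars.isIn pvLink cur.reverse then cur.reverse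
              else pvFirstHit (PySem.Chars.split₀.go rest [] [])) = _
        by_cases hin : PySem.Chars.isIn pvLink cur.reverse = true
      -- hit: the pending word is the answer on both sides
        · rw [if_pos hin, pvExpand_hit cur.reverse rest c hrs hc hin]
        · rw [if_neg (by simp [hin]),
            pvExpand_miss cur.reverse rest c hc (eq_false_of_ne_true hin)]
          simpa using ih [] (by simp)
    · rw [pvGoChar c rest cur [] (eq_false_of_ne_true hc)]
      have := ih (c :: cur) (by
        intro a ha
        rcases List.mem_cons.mp ha with h | h
        · rw [h]; exact eq_false_of_ne_true hc
        · exact hcur a h)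
      rw [this]
      congr 1
      simp

-- B's index scans compute the takeWhile boundaries
theorem pvScanLeft (cs : List Char) : ∀ (i : Nat), i ≤ cs.length →
    scanLeft cs i = i - ((cs.take i).reverse.takeWhile pvP).length := by
  intro i
  induction i with
  | zero => intro _; simp [scanLeft]
  | succ j ihj =>
    intro hj
    have hjl : j < cs.length := by omega
    have hget : cs.getD j ' ' = cs[j] := List.getD_eq_getElem cs ' ' hjl
    have htake : (cs.take (j + 1)).reverse = cs[j] :: (cs.take j).reverse := by
      rw [List.take_succ_eq_append_getElem hjl]
      simp
    rw [scanLeft, hget]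
    by_cases h : PySem.Chars.isspace cs[j] = true
    · rw [if_pos h, htake, List.takeWhile_cons_of_neg (by simp [pvP, h])]
      simp
    · have hL : ((cs.take j).reverse.takeWhile pvP).length ≤ j := by
        have := List.IsPrefix.length_le (List.takeWhile_prefix (l := (cs.take j).reverse) pvP)
        simp at this
        omega
      rw [if_neg h, ihj (by omega), htake,
        List.takeWhile_cons_of_pos (by simp [pvP, eq_false_of_ne_true h])]
      simp

theorem pvScanRight (cs : List Char) (k : Nat) :
    scanRight cs k = k + ((cs.drop k).takeWhile pvP).length := by
  have main : ∀ (n k : Nat), cs.length - k ≤ n →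
      scanRight cs k = k + ((cs.drop k).takeWhile pvP).length := by
    intro n
    induction n with
    | zero =>
      intro k hk
      have hge : cs.length ≤ k := by omega
      rw [scanRight, dif_neg (by omega), List.drop_eq_nil_of_le hge]
      simp
    | succ n ihn =>
      intro k hk
      by_cases hlt : k < cs.length
      · have hdrop : cs.drop k = cs[k] :: cs.drop (k + 1) := List.drop_eq_getElem_cons hlt
        rw [scanRight, dif_pos hlt]
        by_cases h : PySem.Chars.isspace cs[k] = true
        · rw [if_pos h, hdrop, List.takeWhile_cons_of_neg (by simp [pvP, h])]
          simp
        · rw [if_neg h, ihn (k + 1) (by omega), hdrop,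
            List.takeWhile_cons_of_pos (by simp [pvP, eq_false_of_ne_true h])]
          simp
          omega
      · rw [scanRight, dif_neg hlt, List.drop_eq_nil_of_le (by omega)]
        simp
  exact main cs.length k (by omega)

-- the slice between the two scans is exactly the expanded word
theorem pvSliceEq (cs : List Char) (i : Nat) (hi : i ≤ cs.length) :
    (cs.drop (scanLeft cs i)).take (scanRight cs i - scanLeft cs i) = pvW cs i := by
  have hLlen : ((cs.take i).reverse.takeWhile pvP).length ≤ i := by
    have := List.IsPrefix.length_le (List.takeWhile_prefix (l := (cs.take i).reverse) pvP)
    simp at this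
    omega
  set L := (cs.take i).reverse.takeWhile pvP with hLdef
  set R := (cs.drop i).takeWhile pvP with hRdef
  rw [pvScanLeft cs i hi, pvScanRight cs i]
  have hdecomp : cs.take i = ((cs.take i).reverse.dropWhile pvP).reverse ++ L.reverse := by
    conv_lhs => rw [← List.reverse_reverse (cs.take i),
      ← List.takeWhile_append_dropWhile (p := pvP) (l := (cs.take i).reverse)]
    rw [List.reverse_append]
  have hjlen : (((cs.take i).reverse.dropWhile pvP).reverse).length = i - L.length := by
    have h3 := congrArg List.length
      (List.takeWhile_append_dropWhile (p := pvP) (l := (cs.take i).reverse))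
    rw [List.length_append, List.length_reverse, List.length_take] at h3
    rw [← hLdef] at h3
    rw [List.length_reverse]
    omega
  have hcs : cs = ((cs.take i).reverse.dropWhile pvP).reverse ++ (L.reverse ++ cs.drop i) := by
    conv_lhs => rw [← List.take_append_drop i cs, hdecomp]
    simp
  have hdropped : cs.drop (i - L.length) = L.reverse ++ cs.drop i := by
    conv_lhs => rw [hcs]
    exact List.drop_left' hjlen
  rw [hdropped]
  have harith : i + R.length - (i - L.length) = L.reverse.length + R.length := by
    simp
    omega
  rw [harith, List.take_length_add_append]
  have hR : (cs.drop i).take R.length = R :=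
    (List.prefix_iff_eq_take.mp (List.takeWhile_prefix pvP)).symm
  rw [hR, pvW]

theorem pvAltEq (text : String) : hasLink_alt text = String.ofList (pvExpand text.toList) := by
  rw [hasLink_alt]
  simp only [PySem.Str.find_eq]
  have hLink : "https://".toList = pvLink := by rfl
  rw [hLink]
  have hge := PySem.Chars.neg_one_le_find text.toList pvLink
  have hle := PySem.Chars.find_le_length text.toList pvLink
  by_cases h : PySem.Chars.find text.toList pvLink < 0
  · rw [if_pos h, pvExpand, if_pos (by omega)]
  · rw [if_neg h, pvExpand, if_neg (by omega)]
    congr 1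
    rw [PySem.Chars.slice_eq_listSlice, PySem.List.slice_natCast]
    exact pvSliceEq text.toList (PySem.Chars.find text.toList pvLink).toNat (by omega)

theorem pvLoopEq (ws : List String) :
    hasLinkLoop ws = String.ofList (pvFirstHit (ws.map String.toList)) := by
  induction ws with
  | nil => rfl
  | cons w ws ih =>
    show (if PySem.Str.isIn "https://" w then w else hasLinkLoop ws) = _
    rw [PySem.Str.isIn_eq]
    have hLink : "https://".toList = pvLink := by rfl
    rw [hLink]
    simp only [List.map_cons]
    show _ = String.ofList (if PySem.Chars.isIn pvLink w.toList then w.toList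
      else pvFirstHit (ws.map String.toList))
    by_cases h : PySem.Chars.isIn pvLink w.toList = true
    · rw [if_pos h, if_pos h, String.ofList_toList]
    · rw [if_neg (by simp [h]), if_neg (by simp [h])]
      exact ih

theorem pvMain (text : String) : hasLink text = hasLink_alt text := by
  rw [hasLink, pvLoopEq, PySem.Str.split₀_map_toList, pvAltEq]
  congr 1
  have := pvGo text.toList [] (by simp)
  simpa [PySem.Chars.split₀] using this

-- ===== VERDICT (by name: the statement is the Claim_ definition above) =====
theorem hasLink_spec : Claim_equal_hasLink := by
  intro text _
  exact pvMain text
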